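-- pv_equiv track=rewrite | github.com/jinha2536/mdm-arithmetic | diffusion-arithmetic/experiments/exp_maze.py | compute_dependency_context
-- ===== SOURCE A (Python) =====
-- def compute_dependency_context(grid, path, path_set, roles, bfs_depths, start, end, H, W):
--     """Per-cell dependency context (= addition's _dependency_context_at_pos).
--     Returns dict: cell_index → context_name."""
--     # Median BFS depth of corridor cells
--     corridor_depths = [bfs_depths.get(ci, 0) for ci in path if roles.get(ci) == 'corridor']
--     median_depth = sorted(corridor_depths)[len(corridor_depths) // 2] if corridor_depths else 0
--
--     ctx = {}
--     for i in range(H * W):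
--         role = roles.get(i, 'wall')
--         if role in ('wall', 'off_path', 'start', 'end'):
--             ctx[i] = role
--         elif role == 'junction':
--             ctx[i] = 'junction'
--         elif role == 'corridor':
--             # Check if adjacent to a junction on the path
--             r, c = i // W, i % W
--             adj_junction = False
--             for dr, dc in [(0, 1), (0, -1), (1, 0), (-1, 0)]:
--                 nr, nc = r + dr, c + dc
--                 ni = nr * W + nc
--                 if 0 <= nr < H and 0 <= nc < W and ni in path_set and roles.get(ni) == 'junction':
--                     adj_junction = True; break
--             if adj_junction:
--                 ctx[i] = 'corridor_entrance'
--             elif bfs_depths.get(i, 0) >= median_depth: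
--                 ctx[i] = 'corridor_deep'
--             else:
--                 ctx[i] = 'corridor_shallow'
--         else:
--             ctx[i] = 'off_path'
--     return ctx
-- ===== SOURCE B (Python) =====
-- def compute_dependency_context(grid, path, path_set, roles, bfs_depths, start, end, H, W):
--     """Per-cell dependency context; entrance cells found by scattering from junctions."""
--     depths = sorted(bfs_depths.get(ci, 0) for ci in path if roles.get(ci) == 'corridor')
--     median = depths[len(depths) // 2] if depths else 0
--     n = H * W
--     entrance = set()
--     for j in path_set:
--         if 0 <= j < n and roles.get(j) == 'junction':
--             jr, jc = divmod(j, W)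
--             for dr, dc in ((0, 1), (0, -1), (1, 0), (-1, 0)):
--                 nr, nc = jr + dr, jc + dc
--                 if 0 <= nr < H and 0 <= nc < W:
--                     entrance.add(nr * W + nc)
--     ctx = {}
--     for i in range(n):
--         role = roles.get(i, 'wall')
--         if role in ('wall', 'off_path', 'start', 'end', 'junction'):
--             ctx[i] = role
--         elif role == 'corridor':
--             if i in entrance:
--                 ctx[i] = 'corridor_entrance'
--             elif bfs_depths.get(i, 0) >= median:
--                 ctx[i] = 'corridor_deep'
--             else:
--                 ctx[i] = 'corridor_shallow'
--         else:
--             ctx[i] = 'off_path'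
--     return ctx
-- ===== Notes on version B (the rewrite author's own statement) =====
-- stated objective: alternative
-- what changed: A tests each corridor cell's four neighbours for an on-path junction inside the main pass; B instead precomputes an 'entrance' index set by scattering from on-path junction cells and the main pass becomes a single set-membership lookup.
import Mathlib
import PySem

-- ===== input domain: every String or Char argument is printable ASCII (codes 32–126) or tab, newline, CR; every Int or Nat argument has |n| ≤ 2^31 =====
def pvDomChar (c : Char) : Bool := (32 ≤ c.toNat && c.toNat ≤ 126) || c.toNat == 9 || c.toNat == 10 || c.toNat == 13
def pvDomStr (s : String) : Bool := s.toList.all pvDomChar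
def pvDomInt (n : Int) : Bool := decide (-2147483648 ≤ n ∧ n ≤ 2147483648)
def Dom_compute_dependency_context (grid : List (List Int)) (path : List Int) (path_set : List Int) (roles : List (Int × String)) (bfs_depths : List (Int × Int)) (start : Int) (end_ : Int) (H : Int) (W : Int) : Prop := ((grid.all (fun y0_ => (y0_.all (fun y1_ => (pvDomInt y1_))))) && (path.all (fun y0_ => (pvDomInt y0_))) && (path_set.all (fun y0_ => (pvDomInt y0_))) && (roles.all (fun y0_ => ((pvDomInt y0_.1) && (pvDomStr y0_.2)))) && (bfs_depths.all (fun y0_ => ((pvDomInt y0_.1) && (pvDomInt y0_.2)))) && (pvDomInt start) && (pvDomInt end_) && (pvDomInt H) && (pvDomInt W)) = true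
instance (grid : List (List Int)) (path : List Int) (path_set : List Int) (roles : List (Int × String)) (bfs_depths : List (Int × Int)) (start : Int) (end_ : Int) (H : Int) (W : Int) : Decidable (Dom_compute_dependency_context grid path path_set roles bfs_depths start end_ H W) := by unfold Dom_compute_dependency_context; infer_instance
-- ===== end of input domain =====

-- B replaces A's per-corridor-cell neighbour scan by a precomputed 'entrance' set
-- scattered from on-path junction cells; same results, a different decomposition (alternative).

-- the four direction offsets [(0,1),(0,-1),(1,0),(-1,0)] shared by both Pythons
def pvDirs : List (Int × Int) := [(0,1),(0,-1),(1,0),(-1,0)]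

-- ===== PORT A =====
-- A's loop body for one cell index i
def pvStepA (path_set : List Int) (rolesD : PySem.Dict Int String) (depthsD : PySem.Dict Int Int)
    (median_depth H W : Int) (ctx : PySem.Dict Int String) (i : Int) : PySem.Dict Int String :=
  let role := rolesD.getD i "wall"
  if role = "wall" ∨ role = "off_path" ∨ role = "start" ∨ role = "end" then ctx.insert i role
  else if role = "junction" then ctx.insert i "junction"
  else if role = "corridor" then
    let r := PySem.Int.floordiv i W
    let c := PySem.Int.mod i W
    let adj_junction := pvDirs.any (fun d =>
      let nr := r + d.1
      let nc := c + d.2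
      let ni := nr * W + nc
      decide (0 ≤ nr ∧ nr < H ∧ 0 ≤ nc ∧ nc < W) && path_set.contains ni &&
        (rolesD.get? ni == some "junction"))
    if adj_junction then ctx.insert i "corridor_entrance"
    else if depthsD.getD i 0 ≥ median_depth then ctx.insert i "corridor_deep"
    else ctx.insert i "corridor_shallow"
  else ctx.insert i "off_path"

def compute_dependency_context (grid : List (List Int)) (path : List Int) (path_set : List Int) (roles : List (Int × String)) (bfs_depths : List (Int × Int)) (start : Int) (end_ : Int) (H : Int) (W : Int) : List (Int × String) :=
  let rolesD := PySem.Dict.mk roles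
  let depthsD := PySem.Dict.mk bfs_depths
  let corridor_depths := (path.filter (fun ci => rolesD.get? ci == some "corridor")).map
      (fun ci => depthsD.getD ci 0)
  let median_depth := if corridor_depths ≠ [] then
      PySem.List.pyGetD (PySem.List.sorted corridor_depths (fun x => x) false)
        (PySem.Int.floordiv (corridor_depths.length : Int) 2) 0
    else 0
  let ctx := (PySem.List.pyRange 0 (H * W) 1).foldl
      (pvStepA path_set rolesD depthsD median_depth H W) PySem.Dict.empty
  ctx.items

-- ===== PORT B =====
-- B's entrance set: scatter the in-bounds neighbours of every on-path in-bounds junction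
def pvEntrance (path_set : List Int) (rolesD : PySem.Dict Int String) (n H W : Int) : PySem.Set Int :=
  path_set.foldl (fun s j =>
    if decide (0 ≤ j ∧ j < n) && (rolesD.get? j == some "junction") then
      let jr := PySem.Int.floordiv j W
      let jc := PySem.Int.mod j W
      pvDirs.foldl (fun s d =>
        let nr := jr + d.1
        let nc := jc + d.2
        if 0 ≤ nr ∧ nr < H ∧ 0 ≤ nc ∧ nc < W then PySem.Set.add s (nr * W + nc) else s) s
    else s) PySem.Set.empty

-- B's loop body for one cell index i
def pvStepB (entrance : PySem.Set Int) (rolesD : PySem.Dict Int String) (depthsD : PySem.Dict Int Int)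
    (median : Int) (ctx : PySem.Dict Int String) (i : Int) : PySem.Dict Int String :=
  let role := rolesD.getD i "wall"
  if role = "wall" ∨ role = "off_path" ∨ role = "start" ∨ role = "end" ∨ role = "junction" then
    ctx.insert i role
  else if role = "corridor" then
    if PySem.Set.contains entrance i then ctx.insert i "corridor_entrance"
    else if depthsD.getD i 0 ≥ median then ctx.insert i "corridor_deep"
    else ctx.insert i "corridor_shallow"
  else ctx.insert i "off_path"

def compute_dependency_context_alt (grid : List (List Int)) (path : List Int) (path_set : List Int) (roles : List (Int × String)) (bfs_depths : List (Int × Int)) (start : Int) (end_ : Int) (H : Int) (W : Int) : List (Int × String) :=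
  let rolesD := PySem.Dict.mk roles
  let depthsD := PySem.Dict.mk bfs_depths
  let depths := PySem.List.sorted ((path.filter (fun ci => rolesD.get? ci == some "corridor")).map
      (fun ci => depthsD.getD ci 0)) (fun x => x) false
  let median := if depths ≠ [] then
      PySem.List.pyGetD depths (PySem.Int.floordiv (depths.length : Int) 2) 0
    else 0
  let n := H * W
  let entrance := pvEntrance path_set rolesD n H W
  let ctx := (PySem.List.pyRange 0 n 1).foldl
      (pvStepB entrance rolesD depthsD median) PySem.Dict.empty
  ctx.items

-- ===== PRECONDITION & SPEC =====
def Spec_compute_dependency_context (grid : List (List Int)) (path : List Int) (path_set : List Int) (roles : List (Int × String)) (bfs_depths : List (Int × Int)) (start : Int) (end_ : Int) (H : Int) (W : Int) (out : List (Int × String)) : Prop := out = compute_dependency_context_alt grid path path_set roles bfs_depths start end_ H W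
instance (grid : List (List Int)) (path : List Int) (path_set : List Int) (roles : List (Int × String)) (bfs_depths : List (Int × Int)) (start : Int) (end_ : Int) (H : Int) (W : Int) (out : List (Int × String)) : Decidable (Spec_compute_dependency_context grid path path_set roles bfs_depths start end_ H W out) := by unfold Spec_compute_dependency_context; infer_instance

-- ===== CLAIM (what is proved, stated in full; the proofs are below) =====
def Claim_equal_compute_dependency_context : Prop := ∀ (grid : List (List Int)) (path : List Int) (path_set : List Int) (roles : List (Int × String)) (bfs_depths : List (Int × Int)) (start : Int) (end_ : Int) (H : Int) (W : Int), Dom_compute_dependency_context grid path path_set roles bfs_depths start end_ H W → Spec_compute_dependency_context grid path path_set roles bfs_depths start end_ H W (compute_dependency_context grid path path_set roles bfs_depths start end_ H W)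

-- ===== LEMMAS AND PROOFS =====

-- coordinates of a packed in-bounds index (W > 0)
lemma pv_idx_coords (W H i : Int) (hW : 0 < W) (h0 : 0 ≤ i) (h1 : i < H * W) :
    0 ≤ PySem.Int.floordiv i W ∧ PySem.Int.floordiv i W < H ∧
      0 ≤ PySem.Int.mod i W ∧ PySem.Int.mod i W < W ∧
      PySem.Int.floordiv i W * W + PySem.Int.mod i W = i := by
  exact ⟨(PySem.Int.le_floordiv_iff_mul_le hW).mpr (by linarith),
    (PySem.Int.floordiv_lt_iff_lt_mul hW).mpr h1,
    PySem.Int.mod_nonneg i hW, PySem.Int.mod_lt i hW,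
    PySem.Int.floordiv_mul_add_mod i W⟩

-- floordiv/mod of an explicitly packed index (W > 0)
lemma pv_coords_pack (W a b : Int) (hW : 0 < W) (hb0 : 0 ≤ b) (hbW : b < W) :
    PySem.Int.floordiv (a * W + b) W = a ∧ PySem.Int.mod (a * W + b) W = b := by
  have hd : PySem.Int.floordiv (a * W + b) W = a := by
    rw [PySem.Int.floordiv_eq_iff_of_pos hW]
    constructor <;> nlinarith
  refine ⟨hd, ?_⟩
  have := PySem.Int.floordiv_mul_add_mod (a * W + b) W
  rw [hd] at this; linarith

-- packed in-bounds coordinates give an in-range index (W > 0)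
lemma pv_pack_range (W H a b : Int) (ha0 : 0 ≤ a) (haH : a < H) (hb0 : 0 ≤ b) (hbW : b < W) :
    0 ≤ a * W + b ∧ a * W + b < H * W := by
  constructor <;> nlinarith

-- each direction's opposite is again a direction
lemma pv_neg_mem (d : Int × Int) (hd : d ∈ pvDirs) : (-d.1, -d.2) ∈ pvDirs := by
  simp only [pvDirs, List.mem_cons, List.not_mem_nil, or_false] at hd ⊢
  rcases hd with rfl | rfl | rfl | rfl <;> norm_num

-- membership in a fold whose step only adds elements with property P
lemma pv_mem_foldl {β : Type} (l : List β) (g : PySem.Set Int → β → PySem.Set Int)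
    (P : β → Int → Prop) (h : ∀ s j x, x ∈ g s j ↔ x ∈ s ∨ P j x) (s : PySem.Set Int) (x : Int) :
    x ∈ l.foldl g s ↔ x ∈ s ∨ ∃ j ∈ l, P j x := by
  induction l generalizing s with
  | nil => simp
  | cons j t ih =>
    simp only [List.foldl_cons, List.mem_cons, ih, h]
    constructor
    · rintro ((hs | hp) | ⟨j', hj', hp⟩)
      · exact Or.inl hs
      · exact Or.inr ⟨j, Or.inl rfl, hp⟩
      · exact Or.inr ⟨j', Or.inr hj', hp⟩
    · rintro (hs | ⟨j', (rfl | hj'), hp⟩)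
      · exact Or.inl (Or.inl hs)
      · exact Or.inl (Or.inr hp)
      · exact Or.inr ⟨j', hj', hp⟩

-- membership in the inner scatter fold of pvEntrance
lemma pv_mem_scatter (s : PySem.Set Int) (jr jc H W x : Int) :
    x ∈ pvDirs.foldl (fun s d =>
        if 0 ≤ jr + d.1 ∧ jr + d.1 < H ∧ 0 ≤ jc + d.2 ∧ jc + d.2 < W then
          PySem.Set.add s ((jr + d.1) * W + (jc + d.2)) else s) s ↔
      x ∈ s ∨ ∃ d ∈ pvDirs, (0 ≤ jr + d.1 ∧ jr + d.1 < H ∧ 0 ≤ jc + d.2 ∧ jc + d.2 < W) ∧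
        x = (jr + d.1) * W + (jc + d.2) := by
  refine pv_mem_foldl pvDirs
    (fun s d => if 0 ≤ jr + d.1 ∧ jr + d.1 < H ∧ 0 ≤ jc + d.2 ∧ jc + d.2 < W then
      PySem.Set.add s ((jr + d.1) * W + (jc + d.2)) else s)
    (fun d x => (0 ≤ jr + d.1 ∧ jr + d.1 < H ∧ 0 ≤ jc + d.2 ∧ jc + d.2 < W) ∧
      x = (jr + d.1) * W + (jc + d.2))
    (fun s d x => ?_) s x
  dsimp only
  split_ifs with hb
  · rw [PySem.Set.mem_add]; tauto
  · simp [hb]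

-- membership in pvEntrance
lemma pv_mem_entrance (path_set : List Int) (rolesD : PySem.Dict Int String) (n H W x : Int) :
    x ∈ pvEntrance path_set rolesD n H W ↔
      ∃ j ∈ path_set, ((0 ≤ j ∧ j < n) ∧ rolesD.get? j = some "junction") ∧
        ∃ d ∈ pvDirs,
          (0 ≤ PySem.Int.floordiv j W + d.1 ∧ PySem.Int.floordiv j W + d.1 < H ∧
            0 ≤ PySem.Int.mod j W + d.2 ∧ PySem.Int.mod j W + d.2 < W) ∧
          x = (PySem.Int.floordiv j W + d.1) * W + (PySem.Int.mod j W + d.2) := by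
  unfold pvEntrance
  rw [pv_mem_foldl path_set _
    (fun j x => ((0 ≤ j ∧ j < n) ∧ rolesD.get? j = some "junction") ∧
      ∃ d ∈ pvDirs,
        (0 ≤ PySem.Int.floordiv j W + d.1 ∧ PySem.Int.floordiv j W + d.1 < H ∧
          0 ≤ PySem.Int.mod j W + d.2 ∧ PySem.Int.mod j W + d.2 < W) ∧
        x = (PySem.Int.floordiv j W + d.1) * W + (PySem.Int.mod j W + d.2))
    (fun s j x => by
      by_cases hj : (0 ≤ j ∧ j < n) ∧ rolesD.get? j = some "junction"
      · rw [if_pos (by simp [hj.1.1, hj.1.2, hj.2]), pv_mem_scatter]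
        exact or_congr Iff.rfl ⟨fun h => ⟨hj, h⟩, fun h => h.2⟩
      · rw [if_neg (by simp only [Bool.and_eq_true, decide_eq_true_eq, beq_iff_eq]; exact hj)]
        exact ⟨Or.inl, fun h => h.elim id (fun h' => absurd h'.1 hj)⟩)]
  simp only [PySem.Set.empty, List.not_mem_nil, false_or]

-- A's neighbour scan at an in-range cell hits exactly B's entrance set
lemma pv_adj_iff (path_set : List Int) (rolesD : PySem.Dict Int String) (H W i : Int)
    (h0 : 0 ≤ i) (h1 : i < H * W) :
    (pvDirs.any (fun d =>
        decide (0 ≤ PySem.Int.floordiv i W + d.1 ∧ PySem.Int.floordiv i W + d.1 < H ∧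
          0 ≤ PySem.Int.mod i W + d.2 ∧ PySem.Int.mod i W + d.2 < W) &&
        path_set.contains ((PySem.Int.floordiv i W + d.1) * W + (PySem.Int.mod i W + d.2)) &&
        (rolesD.get? ((PySem.Int.floordiv i W + d.1) * W + (PySem.Int.mod i W + d.2)) ==
          some "junction")) = true) ↔
      i ∈ pvEntrance path_set rolesD (H * W) H W := by
  rw [pv_mem_entrance, List.any_eq_true]
  simp only [Bool.and_eq_true, decide_eq_true_eq, List.contains_eq_mem, beq_iff_eq]
  constructor
  · rintro ⟨d, hd, ⟨⟨hnr0, hnrH, hnc0, hncW⟩, hmem⟩, hrole⟩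
    have hW : 0 < W := by linarith
    obtain ⟨hr0, hrH, hc0, hcW, hpack⟩ := pv_idx_coords W H i hW h0 h1
    obtain ⟨hjd, hjm⟩ :=
      pv_coords_pack W (PySem.Int.floordiv i W + d.1) (PySem.Int.mod i W + d.2) hW hnc0 hncW
    refine ⟨(PySem.Int.floordiv i W + d.1) * W + (PySem.Int.mod i W + d.2), hmem,
      ⟨pv_pack_range W H _ _ hnr0 hnrH hnc0 hncW, hrole⟩,
      (-d.1, -d.2), pv_neg_mem d hd, ?_, ?_⟩
    · rw [hjd, hjm]
      exact ⟨by linarith, by linarith, by linarith, by linarith⟩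
    · rw [hjd, hjm,
        show PySem.Int.floordiv i W + d.1 + -d.1 = PySem.Int.floordiv i W by ring,
        show PySem.Int.mod i W + d.2 + -d.2 = PySem.Int.mod i W by ring]
      exact hpack.symm
  · rintro ⟨j, hmem, ⟨⟨hj0, hjn⟩, hrole⟩, d, hd, ⟨hnr0, hnrH, hnc0, hncW⟩, hx⟩
    have hW : 0 < W := by linarith
    obtain ⟨hjr0, hjrH, hjc0, hjcW, hjpack⟩ := pv_idx_coords W H j hW hj0 hjn
    obtain ⟨hid, him⟩ : PySem.Int.floordiv i W = PySem.Int.floordiv j W + d.1 ∧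
        PySem.Int.mod i W = PySem.Int.mod j W + d.2 := by
      rw [hx]
      exact pv_coords_pack W (PySem.Int.floordiv j W + d.1) (PySem.Int.mod j W + d.2) hW hnc0 hncW
    have hback : (PySem.Int.floordiv j W + d.1 + -d.1) * W + (PySem.Int.mod j W + d.2 + -d.2)
        = j := by
      rw [show PySem.Int.floordiv j W + d.1 + -d.1 = PySem.Int.floordiv j W by ring,
        show PySem.Int.mod j W + d.2 + -d.2 = PySem.Int.mod j W by ring]
      exact hjpack
    refine ⟨(-d.1, -d.2), pv_neg_mem d hd, ⟨?_, ?_⟩, ?_⟩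
    · rw [hid, him]
      exact ⟨by linarith, by linarith, by linarith, by linarith⟩
    · rw [hid, him, hback]; exact hmem
    · rw [hid, him, hback]; exact hrole

-- one cell: A's step equals B's step on in-range indices
lemma pv_step_eq (path_set : List Int) (rolesD : PySem.Dict Int String)
    (depthsD : PySem.Dict Int Int) (median H W : Int) (ctx : PySem.Dict Int String) (i : Int)
    (h0 : 0 ≤ i) (h1 : i < H * W) :
    pvStepA path_set rolesD depthsD median H W ctx i =
      pvStepB (pvEntrance path_set rolesD (H * W) H W) rolesD depthsD median ctx i := by
  unfold pvStepA pvStepB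
  dsimp only
  by_cases hw : rolesD.getD i "wall" = "wall" ∨ rolesD.getD i "wall" = "off_path" ∨
      rolesD.getD i "wall" = "start" ∨ rolesD.getD i "wall" = "end"
  · rw [if_pos hw, if_pos (Or.imp id (Or.imp id (Or.imp id Or.inl)) hw)]
  · by_cases hjn : rolesD.getD i "wall" = "junction"
    · rw [if_neg hw, if_pos hjn,
        if_pos (Or.inr (Or.inr (Or.inr (Or.inr hjn)))), hjn]
    · rw [if_neg hw, if_neg hjn]
      have hB5 : ¬(rolesD.getD i "wall" = "wall" ∨ rolesD.getD i "wall" = "off_path" ∨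
          rolesD.getD i "wall" = "start" ∨ rolesD.getD i "wall" = "end" ∨
          rolesD.getD i "wall" = "junction") := by
        simp only [not_or] at hw ⊢
        exact ⟨hw.1, hw.2.1, hw.2.2.1, hw.2.2.2, hjn⟩
      by_cases hcr : rolesD.getD i "wall" = "corridor"
      · rw [if_pos hcr, if_neg hB5, if_pos hcr]
        have hadj := pv_adj_iff path_set rolesD H W i h0 h1
        rw [PySem.Set.contains_eq_decide]
        by_cases hmem : i ∈ pvEntrance path_set rolesD (H * W) H W
        · rw [if_pos (hadj.mpr hmem), if_pos (by simp [hmem])]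
        · have hBnot : ¬(decide (i ∈ pvEntrance path_set rolesD (H * W) H W) = true) := by
            simp [hmem]
          rw [if_neg (fun hc => hmem (hadj.mp hc)), if_neg hBnot]
      · rw [if_neg hcr, if_neg hB5, if_neg hcr]

-- the two medians coincide (sorting preserves length and emptiness)
lemma pv_median_eq (cd : List Int) :
    (if cd ≠ [] then
        PySem.List.pyGetD (PySem.List.sorted cd (fun x => x) false)
          (PySem.Int.floordiv (cd.length : Int) 2) 0
      else 0) =
    (if PySem.List.sorted cd (fun x => x) false ≠ [] then
        PySem.List.pyGetD (PySem.List.sorted cd (fun x => x) false)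
          (PySem.Int.floordiv ((PySem.List.sorted cd (fun x => x) false).length : Int) 2) 0
      else 0) := by
  rw [(PySem.List.sorted_perm cd (fun x => x) false).length_eq]
  by_cases h : cd = []
  · subst h; simp [PySem.List.sorted_eq_nil_iff]
  · rw [if_pos h, if_pos (by rw [Ne, PySem.List.sorted_eq_nil_iff]; exact h)]

-- ===== VERDICT (by name: the statement is the Claim_ definition above) =====
theorem compute_dependency_context_spec : Claim_equal_compute_dependency_context := by
  intro grid path path_set roles bfs_depths start end_ H W _
  unfold Spec_compute_dependency_context compute_dependency_context compute_dependency_context_alt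
  dsimp only
  rw [pv_median_eq]
  congr 1
  refine PySem.List.foldl_congr_mem _ _ _ _ (fun acc x hx => ?_)
  rw [PySem.List.mem_pyRange_one] at hx
  exact pv_step_eq path_set (PySem.Dict.mk roles) (PySem.Dict.mk bfs_depths) _ H W acc x hx.1 hx.2
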